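-- pv_equiv track=rewrite | github.com/Lucien-Piat/File_Naming | fun/file_renamer.py | remove_dots
-- ===== SOURCE A (Python) =====
-- def remove_dots(string):
--     if '.' in string :
--         split = string.split('.')
--         cleaned = ""
--         for i in range(len(split)-1):
--             cleaned += split[i]
--         return cleaned +"."+split[-1]
--     return string
-- ===== SOURCE B (Python) =====
-- def remove_dots(string):
--     if '.' in string:
--         idx = string.rfind('.')
--         return string[:idx].replace('.', '') + string[idx:]
--     return string
-- ===== Notes on version B (the rewrite author's own statement) =====
-- stated objective: simpler
-- what changed: Instead of splitting the string at dots and re-concatenating all pieces but the last in a loop, B locates the last dot with rfind and returns the prefix with its dots stripped by a single replace, plus the unchanged suffix.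
import Mathlib
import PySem

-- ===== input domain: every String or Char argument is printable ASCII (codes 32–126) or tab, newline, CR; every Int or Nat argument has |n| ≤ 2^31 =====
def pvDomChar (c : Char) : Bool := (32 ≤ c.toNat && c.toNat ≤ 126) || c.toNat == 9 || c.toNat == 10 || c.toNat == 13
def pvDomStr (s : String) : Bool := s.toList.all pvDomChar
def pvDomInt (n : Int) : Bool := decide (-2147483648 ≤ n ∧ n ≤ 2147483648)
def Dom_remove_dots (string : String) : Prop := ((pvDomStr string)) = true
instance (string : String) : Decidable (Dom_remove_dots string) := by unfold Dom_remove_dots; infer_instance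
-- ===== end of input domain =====

-- B removes every dot except the last one via rfind + slice/replace instead of A's split-and-loop-concatenate; objective: simpler.

-- ===== PORT A =====
def remove_dots (string : String) : String :=
  if PySem.Str.isIn "." string then
    let split := (PySem.Str.split? string ".").getD []
    let cleaned := (PySem.List.pyRange 0 (PySem.List.len split - 1)).foldl
      (fun acc i => acc ++ (PySem.List.pyGet? split i).getD "") ""
    cleaned ++ "." ++ (PySem.List.pyGet? split (-1)).getD ""
  else string

-- ===== PORT B =====
def remove_dots_alt (string : String) : String :=
  if PySem.Str.isIn "." string then
    let idx := PySem.Str.rfind string "."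
    PySem.Str.replace (PySem.Str.slice string none (some idx)) "." "" ++
      PySem.Str.slice string (some idx) none
  else string

-- ===== PRECONDITION & SPEC =====
def Spec_remove_dots (string : String) (out : String) : Prop := out = remove_dots_alt string
instance (string : String) (out : String) : Decidable (Spec_remove_dots string out) := by unfold Spec_remove_dots; infer_instance

-- ===== CLAIM (what is proved, stated in full; the proofs are below) =====
def Claim_equal_remove_dots : Prop := ∀ (string : String), Dom_remove_dots string → Spec_remove_dots string (remove_dots string)

-- ===== LEMMAS AND PROOFS =====

-- common spec: keep every char, but drop a '.' when another '.' follows later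
def gspec : List Char → List Char
  | [] => []
  | c :: t => if c = '.' then (if '.' ∈ t then gspec t else '.' :: t) else c :: gspec t

-- single-char split, front recursion
def sp : List Char → List (List Char)
  | [] => [[]]
  | c :: t => if c = '.' then [] :: sp t else (sp t).modifyHead (c :: ·)

theorem sp_ne_nil (cs : List Char) : sp cs ≠ [] := by
  induction cs with
  | nil => simp [sp]
  | cons c t ih =>
    simp only [sp]
    split
    · simp
    · cases h : sp t with
      | nil => exact absurd h ih
      | cons x xs => simp [List.modifyHead]

theorem sp_not_mem {cs : List Char} (h : '.' ∉ cs) : sp cs = [cs] := by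
  induction cs with
  | nil => rfl
  | cons c t ih =>
    simp only [List.mem_cons, not_or] at h
    have hc : ¬ c = '.' := fun hc => h.1 hc.symm
    simp [sp, hc, ih h.2, List.modifyHead]

theorem sp_two {cs : List Char} (h : '.' ∈ cs) : ∃ p q r, sp cs = p :: q :: r := by
  induction cs with
  | nil => simp at h
  | cons c t ih =>
    by_cases hc : c = '.'
    · obtain ⟨x, xs, hx⟩ : ∃ x xs, sp t = x :: xs := by
        cases h' : sp t with
        | nil => exact absurd h' (sp_ne_nil t)
        | cons x xs => exact ⟨x, xs, rfl⟩
      exact ⟨[], x, xs, by simp [sp, hc, hx]⟩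
    · have ht : '.' ∈ t := by
        rcases List.mem_cons.mp h with h1 | h1
        · exact absurd h1.symm hc
        · exact h1
      obtain ⟨p, q, r, hpqr⟩ := ih ht
      exact ⟨c :: p, q, r, by simp [sp, hc, hpqr, List.modifyHead]⟩

theorem splitOn_go_eq (l : List Char) : ∀ (fuel : Nat) (cur : List Char) (acc : List (List Char)),
    l.length ≤ fuel →
    PySem.Chars.splitOn.go ['.'] fuel l cur acc = acc.reverse ++ (sp l).modifyHead (cur.reverse ++ ·) := by
  induction l with
  | nil =>
    intro fuel cur acc _
    cases fuel <;> simp [PySem.Chars.splitOn.go.eq_def, sp, List.modifyHead]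
  | cons c t ih =>
    intro fuel cur acc hf
    cases fuel with
    | zero => simp at hf
    | succ f =>
      rw [PySem.Chars.splitOn.go.eq_def]
      simp only [List.length_cons, Nat.succ_le_succ_iff] at hf
      by_cases hc : c = '.'
      · have hpre : List.isPrefixOf ['.'] (c :: t) = true := by
          simp [List.isPrefixOf, hc]
        simp only [hpre, if_pos rfl, List.drop_succ_cons, List.drop_zero, List.length_singleton]
        rw [ih f [] (cur.reverse :: acc) hf]
        simp [sp, hc]
        cases h' : sp t with
        | nil => exact absurd h' (sp_ne_nil t)
        | cons x xs => simp [List.modifyHead]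
      · have hpre : List.isPrefixOf ['.'] (c :: t) = false := by
          simp [List.isPrefixOf]
          intro h; exact absurd h.symm hc
        simp only [hpre]
        rw [if_neg (by simp)]
        rw [ih f (c :: cur) acc hf]
        simp only [sp, if_neg hc]
        cases h' : sp t with
        | nil => exact absurd h' (sp_ne_nil t)
        | cons x xs => simp [List.modifyHead]

theorem splitOn_eq (cs : List Char) : PySem.Chars.splitOn cs ['.'] = sp cs := by
  show PySem.Chars.splitOn.go ['.'] (cs.length + 1) cs [] [] = sp cs
  rw [splitOn_go_eq cs (cs.length + 1) [] [] (by omega)]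
  cases h' : sp cs with
  | nil => exact absurd h' (sp_ne_nil cs)
  | cons x xs => simp [List.modifyHead]

theorem replace_go_eq (l : List Char) : ∀ (fuel : Nat) (acc : List Char),
    l.length ≤ fuel →
    PySem.Chars.replace.go ['.'] [] fuel l acc = acc.reverse ++ l.filter (· ≠ '.') := by
  induction l with
  | nil =>
    intro fuel acc _
    cases fuel <;> simp [PySem.Chars.replace.go.eq_def]
  | cons c t ih =>
    intro fuel acc hf
    cases fuel with
    | zero => simp at hf
    | succ f =>
      rw [PySem.Chars.replace.go.eq_def]
      simp only [List.length_cons, Nat.succ_le_succ_iff] at hf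
      by_cases hc : c = '.'
      · have hpre : List.isPrefixOf ['.'] (c :: t) = true := by simp [List.isPrefixOf, hc]
        simp only [hpre, if_true, List.drop_succ_cons, List.drop_zero, List.length_singleton,
          List.reverse_nil, List.nil_append]
        rw [ih f acc hf]
        simp [List.filter, hc]
      · have hpre : List.isPrefixOf ['.'] (c :: t) = false := by
          simp [List.isPrefixOf]; intro h; exact absurd h.symm hc
        simp only [hpre]
        rw [if_neg (by simp)]
        rw [ih f (c :: acc) hf]
        simp [List.filter_cons, hc]

theorem replace_eq (cs : List Char) :
    PySem.Chars.replace cs ['.'] [] = cs.filter (· ≠ '.') := by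
  show (if List.isEmpty ['.'] = true then _ else PySem.Chars.replace.go ['.'] [] cs.length cs []) = _
  rw [if_neg (by simp)]
  exact replace_go_eq cs cs.length [] le_rfl

-- rfind shift lemma
theorem rfind_go_shift (c : Char) (t : List Char) (sub : List Char) : ∀ (j : Nat),
    PySem.Chars.rfind.go (c :: t) sub (j + 1) =
      if PySem.Chars.rfind.go t sub j = -1 then (if sub.isPrefixOf (c :: t) then 0 else -1)
      else PySem.Chars.rfind.go t sub j + 1 := by
  intro j
  induction j with
  | zero =>
    rw [PySem.Chars.rfind.go.eq_def, PySem.Chars.rfind.go.eq_def (s := t)]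
    simp only [List.drop_succ_cons, List.drop_zero]
    by_cases hp : sub.isPrefixOf t
    · simp [hp]
    · rw [PySem.Chars.rfind.go.eq_def]
      simp [hp]
  | succ j ih =>
    rw [PySem.Chars.rfind.go.eq_def, PySem.Chars.rfind.go.eq_def t sub (j + 1)]
    simp only [List.drop_succ_cons]
    by_cases hp : sub.isPrefixOf (List.drop (j + 1) t)
    · have : ((j : Int) + 1 : Int) ≠ -1 := by omega
      simp [hp]
      omega
    · simp [hp, ih]

theorem rfind_shift (c : Char) (t : List Char) :
    PySem.Chars.rfind (c :: t) ['.'] =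
      if PySem.Chars.rfind t ['.'] = -1 then (if c = '.' then 0 else -1)
      else PySem.Chars.rfind t ['.'] + 1 := by
  show PySem.Chars.rfind.go (c :: t) ['.'] (t.length + 1) = _
  rw [rfind_go_shift c t ['.'] t.length]
  simp only [PySem.Chars.rfind]
  by_cases hc : c = '.'
  · have hpre : List.isPrefixOf ['.'] (c :: t) = true := by simp [List.isPrefixOf, hc]
    simp [hpre, hc]
  · have hpre : List.isPrefixOf ['.'] (c :: t) = false := by
      simp [List.isPrefixOf]
      intro h1; exact absurd h1.symm hc
    simp [hpre, hc]

theorem rfind_not_mem {t : List Char} (h : '.' ∉ t) : PySem.Chars.rfind t ['.'] = -1 := by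
  induction t with
  | nil =>
    show PySem.Chars.rfind.go [] ['.'] 0 = -1
    rw [PySem.Chars.rfind.go.eq_def]
    simp [List.isPrefixOf]
  | cons c t ih =>
    simp only [List.mem_cons, not_or] at h
    have hc : ¬ c = '.' := fun hh => h.1 hh.symm
    rw [rfind_shift, ih h.2]
    simp [hc]

theorem rfind_mem {t : List Char} (h : '.' ∈ t) : 0 ≤ PySem.Chars.rfind t ['.'] := by
  induction t with
  | nil => simp at h
  | cons c t ih =>
    rw [rfind_shift]
    by_cases ht : '.' ∈ t
    · have h0 := ih ht
      rw [if_neg (by omega)]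
      omega
    · have hc : c = '.' := (by simpa [ht] using h : ('.' : Char) = c).symm
      rw [if_pos (rfind_not_mem ht), if_pos hc]

-- B's char-level value equals gspec
theorem bval_eq {cs : List Char} (h : '.' ∈ cs) :
    (cs.take (PySem.Chars.rfind cs ['.']).toNat).filter (· ≠ '.') ++
      cs.drop (PySem.Chars.rfind cs ['.']).toNat = gspec cs := by
  induction cs with
  | nil => simp at h
  | cons c t ih =>
    by_cases ht : '.' ∈ t
    · have h0 := rfind_mem ht
      rw [rfind_shift, if_neg (by omega)]
      have hk : (PySem.Chars.rfind t ['.'] + 1).toNat = (PySem.Chars.rfind t ['.']).toNat + 1 := by omega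
      rw [hk]
      simp only [List.take_succ_cons, List.drop_succ_cons, List.filter_cons]
      by_cases hc : c = '.'
      · simp only [gspec, if_pos hc, if_pos ht, hc]
        simpa using ih ht
      · simp only [gspec, if_neg hc]
        have hdec : (decide (c ≠ '.')) = true := by simp [hc]
        simp only [hdec, if_true, List.cons_append]
        rw [ih ht]
    · have hc : c = '.' := (by simpa [ht] using h : ('.' : Char) = c).symm
      rw [rfind_shift, if_pos (rfind_not_mem ht), if_pos hc]
      simp [gspec, hc, ht]

-- A's char-level value equals gspec
theorem aval_eq {cs : List Char} (h : '.' ∈ cs) :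
    ((sp cs).dropLast).flatten ++ '.' :: ((sp cs).getLast?.getD []) = gspec cs := by
  induction cs with
  | nil => simp at h
  | cons c t ih =>
    by_cases hc : c = '.'
    · obtain ⟨x, xs, hx⟩ : ∃ x xs, sp t = x :: xs := by
        cases h' : sp t with
        | nil => exact absurd h' (sp_ne_nil t)
        | cons x xs => exact ⟨x, xs, rfl⟩
      simp only [sp, if_pos hc, hx]
      by_cases ht : '.' ∈ t
      · have := ih ht
        rw [hx] at this
        simp only [gspec, if_pos hc, if_pos ht]
        simpa using this
      · have hsp : sp t = [t] := sp_not_mem ht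
        rw [hsp] at hx
        injection hx with h1 h2
        subst h1
        subst h2
        simp [gspec, hc, ht]
    · have ht : '.' ∈ t := by
        rcases List.mem_cons.mp h with h1 | h1
        · exact absurd h1.symm hc
        · exact h1
      obtain ⟨p, q, r, hpqr⟩ := sp_two ht
      have := ih ht
      rw [hpqr] at this
      simp only [sp, if_neg hc, hpqr, List.modifyHead]
      simp only [gspec, if_neg hc]
      simp only [List.dropLast_cons_of_ne_nil (by simp : (q :: r) ≠ []), List.flatten_cons,
        List.getLast?_cons_cons] at this ⊢
      rw [List.cons_append, ← this]
      simp

-- map/pyGet? plumbing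
theorem pyGet?_map {α β : Type} (f : α → β) (xs : List α) (i : Int) :
    PySem.List.pyGet? (xs.map f) i = (PySem.List.pyGet? xs i).map f := by
  simp only [PySem.List.pyGet?, List.length_map]
  cases PySem.List.pyIdx? xs.length i with
  | none => rfl
  | some k => simp

theorem toList_fold (r : List Int) : ∀ (ss : List String) (init : String),
    (r.foldl (fun acc i => acc ++ (PySem.List.pyGet? ss i).getD "") init).toList =
      r.foldl (fun acc i => acc ++ (PySem.List.pyGet? (ss.map String.toList) i).getD []) init.toList := by
  induction r with
  | nil => intro ss init; rfl
  | cons i r ih =>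
    intro ss init
    simp only [List.foldl_cons]
    rw [ih]
    congr 1
    rw [String.toList_append, pyGet?_map]
    cases PySem.List.pyGet? ss i with
    | none => simp
    | some s => simp

theorem flatten_take_succ {α : Type} {l : List (List α)} {k : Nat} (h : k < l.length) :
    (l.take (k + 1)).flatten = (l.take k).flatten ++ l[k] := by
  rw [List.take_succ, List.getElem?_eq_getElem h]
  simp only [Option.toList_some, List.flatten_append, List.flatten_cons, List.flatten_nil,
    List.append_nil]

theorem fold_take (pieces : List (List Char)) : ∀ (k : Nat), k ≤ pieces.length → ∀ (init : List Char),
    (PySem.List.pyRange 0 (k : Int)).foldl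
      (fun acc i => acc ++ (PySem.List.pyGet? pieces i).getD []) init =
      init ++ (pieces.take k).flatten := by
  intro k
  induction k with
  | zero =>
    intro _ init
    have : PySem.List.pyRange 0 (0 : Int) = [] := by decide
    simp [this]
  | succ k ih =>
    intro hk init
    have hc1 : ((k + 1 : Nat) : Int) = (k : Int) + 1 := by push_cast; ring
    rw [hc1, PySem.List.pyRange_one_append 0 (k : Int) ((k : Int) + 1) (by omega) (by omega),
      PySem.List.pyRange_one_cons (a := (k : Int)) (b := (k : Int) + 1) (by omega),
      PySem.List.pyRange_one_eq_nil (a := (k : Int) + 1) (b := (k : Int) + 1) le_rfl,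
      List.foldl_append, ih (by omega) init]
    simp only [List.foldl_cons, List.foldl_nil]
    have hlt : k < pieces.length := by omega
    rw [PySem.List.pyGet?_natCast, List.getElem?_eq_getElem hlt, Option.getD_some,
      flatten_take_succ hlt, List.append_assoc]

theorem pyGet?_neg_one {α : Type} (xs : List α) (h : xs ≠ []) :
    PySem.List.pyGet? xs (-1) = xs.getLast? := by
  have hl : 1 ≤ xs.length := by
    cases xs with
    | nil => exact absurd rfl h
    | cons a t => simp
  simp only [PySem.List.pyGet?, PySem.List.pyIdx?]
  rw [if_neg (by omega), if_pos (by omega)]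
  rw [List.getLast?_eq_getElem?]
  simp only [Option.bind]
  congr 1

theorem infix_singleton_iff (cs : List Char) : ['.'] <:+: cs ↔ '.' ∈ cs := by
  constructor
  · intro hinf
    exact hinf.sublist.mem (by simp)
  · intro hm
    obtain ⟨a, b, hab⟩ := List.append_of_mem hm
    exact ⟨a, b, by simp [hab]⟩

theorem isIn_dot (s : String) : PySem.Str.isIn "." s = true ↔ '.' ∈ s.toList := by
  rw [PySem.Str.isIn_eq]
  have : (".".toList) = ['.'] := by decide
  rw [this, PySem.Chars.isIn_iff_infix]
  exact infix_singleton_iff s.toList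

-- main lemma
theorem main_eq (s : String) : remove_dots s = remove_dots_alt s := by
  by_cases hin : PySem.Str.isIn "." s
  · have hmem : '.' ∈ s.toList := (isIn_dot s).mp hin
    apply String.toList_inj.mp
    -- A side
    obtain ⟨ss, hss⟩ : ∃ ss, PySem.Str.split? s "." = some ss := by
      have h1 := PySem.Str.split?_map s "."
      have hd : (".".toList) = ['.'] := by decide
      rw [hd] at h1
      simp only [PySem.Chars.split?, List.isEmpty_cons, if_neg] at h1
      cases h2 : PySem.Str.split? s "." with
      | none => rw [h2] at h1; simp at h1
      | some ss => exact ⟨ss, rfl⟩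
    have hmap : ss.map String.toList = sp s.toList := by
      have h1 := PySem.Str.split?_map s "."
      have hd : (".".toList) = ['.'] := by decide
      rw [hd, hss] at h1
      simp only [Option.map_some, PySem.Chars.split?, List.isEmpty_cons] at h1
      rw [if_neg (by simp)] at h1
      rw [splitOn_eq] at h1
      exact Option.some.injEq _ _ ▸ h1
    have hne : sp s.toList ≠ [] := sp_ne_nil s.toList
    have hlen : 1 ≤ (sp s.toList).length := by
      cases h' : sp s.toList with
      | nil => exact absurd h' hne
      | cons x xs => simp
    have hslen : ss.length = (sp s.toList).length := by
      rw [← hmap, List.length_map]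
    have hA : (remove_dots s).toList =
        ((sp s.toList).take ((sp s.toList).length - 1)).flatten ++
          '.' :: ((sp s.toList).getLast?.getD []) := by
      simp only [remove_dots, if_pos hin, hss, Option.getD_some]
      rw [String.toList_append, String.toList_append, toList_fold, hmap]
      have hlen' : PySem.List.len ss - 1 = (((sp s.toList).length - 1 : Nat) : Int) := by
        simp only [PySem.List.len, hslen]
        omega
      rw [hlen', fold_take (sp s.toList) ((sp s.toList).length - 1) (by omega)]
      have hd : (".".toList) = ['.'] := by decide
      rw [hd]
      have hlast : ((PySem.List.pyGet? ss (-1)).getD "").toList =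
          (sp s.toList).getLast?.getD [] := by
        have hssne : ss ≠ [] := by
          intro hcon; rw [hcon] at hmap; exact hne (by simpa using hmap.symm)
        rw [pyGet?_neg_one ss hssne]
        have : ss.getLast? = some (ss.getLast hssne) := List.getLast?_eq_getLast hssne
        rw [this]
        simp only [Option.getD_some]
        have hm : (ss.map String.toList).getLast? = some ((ss.getLast hssne).toList) := by
          rw [List.getLast?_map, this]
          rfl
        rw [hmap] at hm
        rw [hm]
        rfl
      rw [hlast]
      simp
    -- B side
    have h0 : 0 ≤ PySem.Str.rfind s "." := by
      rw [PySem.Str.rfind_eq]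
      have hd : (".".toList) = ['.'] := by decide
      rw [hd]
      exact rfind_mem hmem
    have hB : (remove_dots_alt s).toList =
        (s.toList.take (PySem.Chars.rfind s.toList ['.']).toNat).filter (· ≠ '.') ++
          s.toList.drop (PySem.Chars.rfind s.toList ['.']).toNat := by
      simp only [remove_dots_alt, if_pos hin]
      rw [String.toList_append, PySem.Str.toList_replace, PySem.Str.toList_slice,
        PySem.Str.toList_slice]
      have hd : (".".toList) = ['.'] := by decide
      have hd0 : ("".toList) = ([] : List Char) := by decide
      rw [hd, hd0]
      rw [PySem.Str.rfind_eq, hd] at h0 ⊢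
      simp only [PySem.Chars.slice_eq_listSlice]
      rw [PySem.List.slice_to _ h0, PySem.List.slice_from _ h0, replace_eq]
    rw [hA, hB]
    rw [← List.dropLast_eq_take] at hA ⊢
    rw [aval_eq hmem, bval_eq hmem]
  · simp only [remove_dots, remove_dots_alt, if_neg hin]

-- ===== VERDICT (by name: the statement is the Claim_ definition above) =====
theorem remove_dots_spec : Claim_equal_remove_dots := by
  intro s _
  show remove_dots s = remove_dots_alt s
  exact main_eq s
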